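-- pv_equiv track=rewrite | github.com/PRIEST099/TenderAlertPro | backend/whatsapp.py | format_pipeline
-- ===== SOURCE A (Python) =====
-- def format_pipeline(items: list[dict]) -> str:
--     """Format the bid pipeline as a kanban-style text list."""
--     if not items:
--         return "Your bid pipeline is empty.\n\nUse *SAVE [tender_id]* after viewing a tender to start tracking it."
--
--     groups = {}
--     for item in items:
--         status = item.get("status", "watching")
--         groups.setdefault(status, []).append(item)
--
--     status_emoji = {"watching": "👀", "preparing": "📝", "submitted": "📤", "won": "🏆", "lost": "❌"}
--     status_order = ["watching", "preparing", "submitted", "won", "lost"]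
--
--     lines = ["*📋 Your Bid Pipeline*\n"]
--     for status in status_order:
--         items_in_status = groups.get(status, [])
--         if not items_in_status:
--             continue
--         emoji = status_emoji.get(status, "•")
--         lines.append(f"{emoji} *{status.upper()}* ({len(items_in_status)})")
--         for item in items_in_status[:5]:
--             title = (item.get("title") or "Untitled")[:40]
--             deadline = (item.get("deadline") or "")[:10]
--             lines.append(f"  • {title}")
--             if deadline:
--                 lines.append(f"    ⏰ Deadline: {deadline}")
--         lines.append("")
--
--     lines.append("_Reply UPDATE [id] [status] to change status_")
--     return "\n".join(lines)
-- ===== SOURCE B (Python) =====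
-- def format_pipeline(items: list[dict]) -> str:
--     """Format the bid pipeline as a kanban-style text list."""
--     if not items:
--         return "Your bid pipeline is empty.\n\nUse *SAVE [tender_id]* after viewing a tender to start tracking it."
--
--     def entry_lines(it):
--         title = (it.get("title") or "Untitled")[:40]
--         deadline = (it.get("deadline") or "")[:10]
--         return [f"  • {title}"] + ([f"    ⏰ Deadline: {deadline}"] if deadline else [])
--
--     def block(status, emoji):
--         bucket = [it for it in items if it.get("status", "watching") == status]
--         if not bucket:
--             return []
--         return ([f"{emoji} *{status.upper()}* ({len(bucket)})"]
--                 + [line for it in bucket[:5] for line in entry_lines(it)]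
--                 + [""])
--
--     body = [line
--             for status, emoji in [("watching", "👀"), ("preparing", "📝"),
--                                   ("submitted", "📤"), ("won", "🏆"), ("lost", "❌")]
--             for line in block(status, emoji)]
--     return "\n".join(["*📋 Your Bid Pipeline*\n"] + body
--                      + ["_Reply UPDATE [id] [status] to change status_"])
-- ===== Notes on version B (the rewrite author's own statement) =====
-- stated objective: alternative
-- what changed: B drops A's grouping dict and its line-accumulator loop: each status block is computed as a pure list of lines (filter + comprehensions) and the blocks are concatenated by flatMap-style comprehension, instead of A's single mutable `lines` list appended to across nested loops.
import Mathlib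
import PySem

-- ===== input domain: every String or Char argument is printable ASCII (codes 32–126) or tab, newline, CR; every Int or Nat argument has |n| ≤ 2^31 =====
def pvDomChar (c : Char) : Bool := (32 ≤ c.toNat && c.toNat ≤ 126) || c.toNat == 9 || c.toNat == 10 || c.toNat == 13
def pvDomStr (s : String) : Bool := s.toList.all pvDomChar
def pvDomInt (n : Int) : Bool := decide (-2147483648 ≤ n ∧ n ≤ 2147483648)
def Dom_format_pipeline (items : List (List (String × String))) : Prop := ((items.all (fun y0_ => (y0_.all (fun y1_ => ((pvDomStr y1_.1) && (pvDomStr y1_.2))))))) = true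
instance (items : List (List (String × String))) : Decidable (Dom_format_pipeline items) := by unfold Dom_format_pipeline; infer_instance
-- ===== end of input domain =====

-- B drops A's grouping dict and line-accumulator loop: each status block is a pure list of lines built by filter/flatMap, blocks concatenated; same output.


-- ===== PORT A =====
-- item.get(k) on a Python dict (first-match association-list lookup), A's style
def pvItemGet? (it : List (String × String)) (k : String) : Option String :=
  (PySem.Dict.mk it).get? k

-- item.get("status", "watching")
def pvStatusOf (it : List (String × String)) : String :=
  (pvItemGet? it "status").getD "watching"

-- A's inner loop body: lines.append(f"  • {title}"); if deadline: lines.append(...)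
def pvItemLines (lines : List String) (it : List (String × String)) : List String :=
  let title := PySem.Str.slice ((pvItemGet? it "title").getD "" |> fun t => if t = "" then "Untitled" else t) none (some 40)
  let deadline := PySem.Str.slice ((pvItemGet? it "deadline").getD "") none (some 10)
  let lines := lines ++ ["  • " ++ title]
  if deadline ≠ "" then lines ++ ["    ⏰ Deadline: " ++ deadline] else lines

def format_pipeline (items : List (List (String × String))) : String :=
  if items = [] then
    "Your bid pipeline is empty.\n\nUse *SAVE [tender_id]* after viewing a tender to start tracking it."
  else
    let groups : PySem.Dict String (List (List (String × String))) :=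
      items.foldl (fun g it => g.modify (pvStatusOf it) [] (· ++ [it])) PySem.Dict.empty
    let status_emoji : PySem.Dict String String :=
      PySem.Dict.ofList [("watching", "👀"), ("preparing", "📝"), ("submitted", "📤"), ("won", "🏆"), ("lost", "❌")]
    let status_order : List String := ["watching", "preparing", "submitted", "won", "lost"]
    let lines : List String := ["*📋 Your Bid Pipeline*\n"]
    let lines := status_order.foldl (fun lines status =>
      let items_in_status := groups.getD status []
      if items_in_status = [] then lines
      else
        let emoji := status_emoji.getD status "•"
        let lines := lines ++ [emoji ++ " *" ++ PySem.Str.upper status ++ "* (" ++ PySem.Int.toStr (items_in_status.length : Int) ++ ")"]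
        let lines := (PySem.List.slice items_in_status none (some 5)).foldl pvItemLines lines
        lines ++ [""]) lines
    let lines := lines ++ ["_Reply UPDATE [id] [status] to change status_"]
    PySem.Str.join "\n" lines

-- ===== PORT B =====
-- B's own lookup: it.get(k) as a first-match scan of the pair list
def pvGetB (it : List (String × String)) (k : String) : Option String :=
  (it.find? (fun p => p.1 == k)).map (·.2)

-- entry_lines(it): the one or two lines an item contributes, as a pure list
def pvEntryLinesB (it : List (String × String)) : List String :=
  let title := PySem.Str.slice
    (match pvGetB it "title" with
     | some t => if t = "" then "Untitled" else t
     | none => "Untitled") none (some 40)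
  let deadline := PySem.Str.slice ((pvGetB it "deadline").getD "") none (some 10)
  ["  • " ++ title] ++ (if deadline ≠ "" then ["    ⏰ Deadline: " ++ deadline] else [])

-- block(status, emoji): the whole block for one status, as a pure list of lines
def pvBlockB (items : List (List (String × String))) (status emoji : String) : List String :=
  let bucket := items.filter (fun it => ((pvGetB it "status").getD "watching") == status)
  if bucket = [] then []
  else
    [emoji ++ " *" ++ PySem.Str.upper status ++ "* (" ++ PySem.Int.toStr (bucket.length : Int) ++ ")"]
      ++ (PySem.List.slice bucket none (some 5)).flatMap pvEntryLinesB ++ [""]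

def format_pipeline_alt (items : List (List (String × String))) : String :=
  if items = [] then
    "Your bid pipeline is empty.\n\nUse *SAVE [tender_id]* after viewing a tender to start tracking it."
  else
    let body := ([("watching", "👀"), ("preparing", "📝"), ("submitted", "📤"), ("won", "🏆"), ("lost", "❌")] :
        List (String × String)).flatMap (fun se => pvBlockB items se.1 se.2)
    PySem.Str.join "\n"
      (["*📋 Your Bid Pipeline*\n"] ++ body ++ ["_Reply UPDATE [id] [status] to change status_"])

-- ===== PRECONDITION & SPEC =====
def Spec_format_pipeline (items : List (List (String × String))) (out : String) : Prop := out = format_pipeline_alt items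
instance (items : List (List (String × String))) (out : String) : Decidable (Spec_format_pipeline items out) := by unfold Spec_format_pipeline; infer_instance

-- ===== CLAIM =====
def Claim_equal_format_pipeline : Prop := ∀ (items : List (List (String × String))), Dom_format_pipeline items → Spec_format_pipeline items (format_pipeline items)

-- ===== LEMMAS AND PROOFS =====

-- both lookups are the same first-match scan
theorem pvGetB_eq (it : List (String × String)) (k : String) : pvItemGet? it k = pvGetB it k := by
  induction it with
  | nil => rfl
  | cons p rest ih =>
    obtain ⟨a, b⟩ := p
    simp only [pvItemGet?, pvGetB, PySem.Dict.get?_mk_cons, List.find?_cons] at *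
    by_cases hk : a == k
    · simp [hk]
    · simpa [hk] using ih

-- A's inner loop body appends exactly B's entry_lines(it)
theorem itemLines_eq (lines : List String) (it : List (String × String)) :
    pvItemLines lines it = lines ++ pvEntryLinesB it := by
  simp only [pvItemLines, pvEntryLinesB, pvGetB_eq]
  cases h : pvGetB it "title" <;>
    simp [Option.getD] <;> split_ifs <;> simp_all

-- A's grouping dict, looked up at any status s, is exactly B's bucket filter
theorem groups_getD (items : List (List (String × String))) (s : String) :
    (items.foldl (fun g it => g.modify (pvStatusOf it) [] (· ++ [it]))
        (PySem.Dict.empty : PySem.Dict String (List (List (String × String))))).getD s []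
      = items.filter (fun it => ((pvGetB it "status").getD "watching") == s) := by
  have h : items.foldl (fun g it => g.modify (pvStatusOf it) [] (· ++ [it]))
        (PySem.Dict.empty : PySem.Dict String (List (List (String × String))))
      = (items.map (fun it => (pvStatusOf it, it))).foldl
          (fun g p => g.modify p.1 [] (· ++ [p.2])) PySem.Dict.empty := by
    rw [List.foldl_map]
  rw [h, PySem.Dict.getD_foldl_modify_append, PySem.Dict.getD_empty, List.filter_map,
    List.map_map]
  simp [Function.comp_def, pvStatusOf, pvGetB_eq]

-- A's inner loop over the sliced bucket appends exactly B's flatMap of entry_lines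
theorem foldl_itemLines (l : List (List (String × String))) (acc : List String) :
    l.foldl pvItemLines acc = acc ++ l.flatMap pvEntryLinesB := by
  induction l generalizing acc with
  | nil => simp
  | cons x xs ih => simp [List.foldl_cons, itemLines_eq, ih]

-- A's per-status fold step appends exactly B's block(status, emoji)
theorem step_eq (items : List (List (String × String))) (lines : List String) (s e : String) :
    (if items.filter (fun it => ((pvGetB it "status").getD "watching") == s) = [] then lines
     else
       ((PySem.List.slice (items.filter (fun it => ((pvGetB it "status").getD "watching") == s)) none (some 5)).foldl
          pvItemLines
          (lines ++ [e ++ " *" ++ PySem.Str.upper s ++ "* (" ++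
            PySem.Int.toStr ((items.filter (fun it => ((pvGetB it "status").getD "watching") == s)).length : Int) ++ ")"]))
         ++ [""])
      = lines ++ pvBlockB items s e := by
  simp only [pvBlockB]
  split_ifs with h
  · simp
  · rw [foldl_itemLines]; simp

-- ===== VERDICT =====
theorem format_pipeline_spec : Claim_equal_format_pipeline := by
  intro items _
  unfold Spec_format_pipeline format_pipeline format_pipeline_alt
  by_cases h : items = []
  · simp [h]
  · simp only [if_neg h, List.foldl_cons, List.foldl_nil, List.flatMap_cons, List.flatMap_nil,
      groups_getD]
    rw [step_eq, step_eq, step_eq, step_eq, step_eq]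
    simp only [List.append_assoc, List.cons_append, List.nil_append]
    rfl
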